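-- pv_equiv track=rewrite | github.com/ThomasSchwartz18/MOATAppSpectra | app/main/routes.py | _build_bug_options
-- ===== SOURCE A (Python) =====
-- def _normalize_bug_id(value: object) -> str | None:
--     if value in (None, ""):
--         return None
--     text = str(value).strip()
--     return text or None
--
-- def _build_bug_options(bug_records: list[dict] | None) -> list[dict[str, object]]:
--     options: list[dict[str, object]] = []
--     for record in bug_records or []:
--         bug_id = _normalize_bug_id(record.get("id"))
--         if bug_id is None:
--             continue
--         status = (record.get("status") or "open").replace("_", " ").title()
--         title = record.get("title") or "Untitled"
--         options.append(
--             {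
--                 "id": bug_id,
--                 "label": f"#{bug_id} — {title} ({status})",
--                 "status": record.get("status") or "open",
--             }
--         )
--
--     options.sort(
--         key=lambda item: (
--             0 if item["status"] == "on_hold" else 1,
--             0 if item["status"] == "open" else 1,
--             str(item["id"]),
--         )
--     )
--     return options
-- ===== SOURCE B (Python) =====
-- def _normalize_bug_id(value: object) -> str | None:
--     if value in (None, ""):
--         return None
--     text = str(value).strip()
--     return text or None
--
-- def _make_option(record: dict) -> dict | None:
--     bug_id = _normalize_bug_id(record.get("id"))
--     if bug_id is None:
--         return None
--     status = (record.get("status") or "open").replace("_", " ").title()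
--     title = record.get("title") or "Untitled"
--     return {
--         "id": bug_id,
--         "label": f"#{bug_id} — {title} ({status})",
--         "status": record.get("status") or "open",
--     }
--
-- def _build_bug_options(bug_records):
--     options = [opt for record in (bug_records or []) if (opt := _make_option(record)) is not None]
--     by_id = lambda item: str(item["id"])
--     on_hold = sorted((o for o in options if o["status"] == "on_hold"), key=by_id)
--     open_ = sorted((o for o in options if o["status"] == "open"), key=by_id)
--     other = sorted((o for o in options if o["status"] not in ("on_hold", "open")), key=by_id)
--     return on_hold + open_ + other
-- ===== Notes on version B (the rewrite author's own statement) =====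
-- stated objective: alternative
-- what changed: The final sort by the composite key (on_hold-first, open-second, str(id)) is replaced by partitioning the built options into three status buckets (on_hold / open / other), sorting each bucket by str(id) alone, and concatenating them; the build loop is refactored into a _make_option helper driving a filtering comprehension.
import Mathlib
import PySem

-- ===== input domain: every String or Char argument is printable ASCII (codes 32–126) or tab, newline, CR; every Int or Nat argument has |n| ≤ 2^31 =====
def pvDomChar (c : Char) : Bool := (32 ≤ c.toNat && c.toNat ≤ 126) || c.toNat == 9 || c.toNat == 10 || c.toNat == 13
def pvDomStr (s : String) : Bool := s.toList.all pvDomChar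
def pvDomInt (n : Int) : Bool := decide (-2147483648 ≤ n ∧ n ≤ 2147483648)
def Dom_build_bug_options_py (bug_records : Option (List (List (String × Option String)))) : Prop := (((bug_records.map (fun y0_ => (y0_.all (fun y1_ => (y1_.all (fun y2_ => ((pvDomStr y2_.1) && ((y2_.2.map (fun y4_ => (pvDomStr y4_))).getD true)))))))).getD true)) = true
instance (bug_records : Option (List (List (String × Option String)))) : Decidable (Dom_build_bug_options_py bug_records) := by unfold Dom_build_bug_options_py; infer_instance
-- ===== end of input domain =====

-- B replaces A's single composite-key sort by a partition into three status buckets each sorted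
-- by id alone (objective: alternative decomposition of the ordering; not claimed faster).

-- ===== PORT A =====

-- record.get(k): none both when the key is missing and when it maps to None
def pvGet (record : List (String × Option String)) (k : String) : Option String :=
  ((PySem.Dict.mk record).get? k).getD none

-- port of _normalize_bug_id (value is always None or a str here; str(value) = value)
def pvNormalizeBugId (value : Option String) : Option String :=
  match value with
  | none => none
  | some s =>
    if s == "" then none
    else
      let text := PySem.Str.strip s
      if text == "" then none else some text

-- port of `v or d` for v : Optional[str] (falsy = None or "")
def pvOrStr (v : Option String) (d : String) : String :=
  match v with
  | some s => if s == "" then d else s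
  | none => d

-- hand port of str.title(): exact on the ASCII domain, where 'cased' = A–Z/a–z = Char.isAlpha
def pvTitleGo : List Char → Bool → List Char
  | [], _ => []
  | c :: cs, prev => (if prev then c.toLower else c.toUpper) :: pvTitleGo cs c.isAlpha

def pvTitle (s : String) : String := String.ofList (pvTitleGo s.toList false)

def pvIdOf (item : List (String × String)) : String := ((PySem.Dict.mk item).get? "id").getD ""
def pvStatusOf (item : List (String × String)) : String := ((PySem.Dict.mk item).get? "status").getD ""

-- the composite sort key (0 if on_hold else 1, 0 if open else 1, str(item["id"]))
def pvKeyA (item : List (String × String)) : Int × Int × String :=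
  ((if pvStatusOf item == "on_hold" then 0 else 1),
   (if pvStatusOf item == "open" then 0 else 1),
   pvIdOf item)

-- strict lexicographic < on the composite key (Python tuple comparison, written out by hand)
def pvLexBefore (a b : List (String × String)) : Bool :=
  decide ((pvKeyA a).1 < (pvKeyA b).1) ||
    ((pvKeyA a).1 == (pvKeyA b).1 &&
      (decide ((pvKeyA a).2.1 < (pvKeyA b).2.1) ||
        ((pvKeyA a).2.1 == (pvKeyA b).2.1 && decide ((pvKeyA a).2.2 < (pvKeyA b).2.2))))

def build_bug_options_py (bug_records : Option (List (List (String × Option String)))) : List (List (String × String)) :=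
  let records := match bug_records with | none => [] | some rs => rs
  let options := records.foldl (fun acc record =>
    match pvNormalizeBugId (pvGet record "id") with
    | none => acc
    | some bug_id =>
      let status := pvTitle (PySem.Str.replace (pvOrStr (pvGet record "status") "open") "_" " ")
      let title := pvOrStr (pvGet record "title") "Untitled"
      acc ++ [[("id", bug_id),
               ("label", "#" ++ bug_id ++ " — " ++ title ++ " (" ++ status ++ ")"),
               ("status", pvOrStr (pvGet record "status") "open")]]) []
  -- hand port of options.sort(key = composite tuple): Python's stable sort is the left-to-right
  -- insertion fold by the strict key-< (exactly as PySem.List.sorted_eq_foldl_insertBy states)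
  options.foldl (fun acc item => PySem.List.insertBy pvLexBefore item acc) []

-- ===== PORT B =====

-- port of _make_option
def pvMakeOption (record : List (String × Option String)) : Option (List (String × String)) :=
  match pvNormalizeBugId (pvGet record "id") with
  | none => none
  | some bug_id =>
    let status := pvTitle (PySem.Str.replace (pvOrStr (pvGet record "status") "open") "_" " ")
    let title := pvOrStr (pvGet record "title") "Untitled"
    some [("id", bug_id),
          ("label", "#" ++ bug_id ++ " — " ++ title ++ " (" ++ status ++ ")"),
          ("status", pvOrStr (pvGet record "status") "open")]

def pvOnHoldP (o : List (String × String)) : Bool := pvStatusOf o == "on_hold"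
def pvOpenP (o : List (String × String)) : Bool := pvStatusOf o == "open"
def pvOtherP (o : List (String × String)) : Bool := !(pvStatusOf o == "on_hold") && !(pvStatusOf o == "open")

def build_bug_options_py_alt (bug_records : Option (List (List (String × Option String)))) : List (List (String × String)) :=
  let records := match bug_records with | none => [] | some rs => rs
  let options := records.filterMap pvMakeOption
  PySem.List.sorted (options.filter pvOnHoldP) pvIdOf
    ++ PySem.List.sorted (options.filter pvOpenP) pvIdOf
    ++ PySem.List.sorted (options.filter pvOtherP) pvIdOf

-- ===== PRECONDITION & SPEC =====
def Spec_build_bug_options_py (bug_records : Option (List (List (String × Option String)))) (out : List (List (String × String))) : Prop := out = build_bug_options_py_alt bug_records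
instance (bug_records : Option (List (List (String × Option String)))) (out : List (List (String × String))) : Decidable (Spec_build_bug_options_py bug_records out) := by unfold Spec_build_bug_options_py; infer_instance

-- ===== CLAIM (what is proved, stated in full; the proofs are below) =====
def Claim_equal_build_bug_options_py : Prop := ∀ (bug_records : Option (List (List (String × Option String)))), Dom_build_bug_options_py bug_records → Spec_build_bug_options_py bug_records (build_bug_options_py bug_records)

-- ===== LEMMAS AND PROOFS =====

-- A's append-building fold is B's filterMap
theorem pv_build_eq (records : List (List (String × Option String))) (acc : List (List (String × String))) :
    records.foldl (fun acc record =>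
      match pvNormalizeBugId (pvGet record "id") with
      | none => acc
      | some bug_id =>
        let status := pvTitle (PySem.Str.replace (pvOrStr (pvGet record "status") "open") "_" " ")
        let title := pvOrStr (pvGet record "title") "Untitled"
        acc ++ [[("id", bug_id),
                 ("label", "#" ++ bug_id ++ " — " ++ title ++ " (" ++ status ++ ")"),
                 ("status", pvOrStr (pvGet record "status") "open")]]) acc
    = acc ++ records.filterMap pvMakeOption := by
  induction records generalizing acc with
  | nil => simp
  | cons r rs ih =>
    simp only [List.foldl_cons, List.filterMap_cons]
    cases h : pvNormalizeBugId (pvGet r "id") with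
    | none => simp [pvMakeOption, h, ih]
    | some bid => simp [pvMakeOption, h, ih]

-- inserting x when it strictly precedes everything in t and bef agrees with bef' on h
theorem pv_insertBy_front {α : Type} (bef bef' : α → α → Bool) (x : α) (h t : List α)
    (hagree : ∀ y ∈ h, bef x y = bef' x y) (ht : ∀ y ∈ t, bef x y = true) :
    PySem.List.insertBy bef x (h ++ t) = PySem.List.insertBy bef' x h ++ t := by
  induction h with
  | nil =>
    cases t with
    | nil => simp [PySem.List.insertBy]
    | cons z t' => simp [PySem.List.insertBy, ht z (by simp)]
  | cons y h' ih =>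
    have hy := hagree y (by simp)
    by_cases hb : bef x y = true
    · simp [PySem.List.insertBy, hb, hy ▸ hb]
    · have hb' : bef' x y = false := by rw [← hy]; simpa using hb
      simp [PySem.List.insertBy, eq_false_of_ne_true hb, hb',
        ih (fun z hz => hagree z (by simp [hz]))]

-- inserting x when it never precedes an element of h
theorem pv_insertBy_skip {α : Type} (bef : α → α → Bool) (x : α) (h t : List α)
    (hh : ∀ y ∈ h, bef x y = false) :
    PySem.List.insertBy bef x (h ++ t) = h ++ PySem.List.insertBy bef x t := by
  induction h with
  | nil => simp
  | cons y h' ih =>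
    simp [PySem.List.insertBy, hh y (by simp), ih (fun z hz => hh z (by simp [hz]))]

-- comparison facts, one per status combination
theorem pv_lex_hold_hold {x y} (hx : pvOnHoldP x = true) (hy : pvOnHoldP y = true) :
    pvLexBefore x y = decide (pvIdOf x < pvIdOf y) := by
  have hx' : pvStatusOf x = "on_hold" := by simpa [pvOnHoldP] using hx
  have hy' : pvStatusOf y = "on_hold" := by simpa [pvOnHoldP] using hy
  simp [pvLexBefore, pvKeyA, hx', hy']

theorem pv_lex_hold_not {x y} (hx : pvOnHoldP x = true) (hy : pvOnHoldP y = false) :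
    pvLexBefore x y = true := by
  have hx' : pvStatusOf x = "on_hold" := by simpa [pvOnHoldP] using hx
  have hy' : (pvStatusOf y == "on_hold") = false := by simpa [pvOnHoldP] using hy
  simp [pvLexBefore, pvKeyA, hx', hy']

theorem pv_lex_not_hold {x y} (hx : pvOnHoldP x = false) (hy : pvOnHoldP y = true) :
    pvLexBefore x y = false := by
  have hx' : (pvStatusOf x == "on_hold") = false := by simpa [pvOnHoldP] using hx
  have hy' : pvStatusOf y = "on_hold" := by simpa [pvOnHoldP] using hy
  simp [pvLexBefore, pvKeyA, hx', hy']

theorem pv_lex_open_open {x y} (hx : pvOpenP x = true) (hy : pvOpenP y = true) :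
    pvLexBefore x y = decide (pvIdOf x < pvIdOf y) := by
  have hx' : pvStatusOf x = "open" := by simpa [pvOpenP] using hx
  have hy' : pvStatusOf y = "open" := by simpa [pvOpenP] using hy
  simp [pvLexBefore, pvKeyA, hx', hy']

theorem pv_lex_open_other {x y} (hx : pvOpenP x = true) (hy : pvOtherP y = true) :
    pvLexBefore x y = true := by
  have hx' : pvStatusOf x = "open" := by simpa [pvOpenP] using hx
  have hy1 : (pvStatusOf y == "on_hold") = false := by
    simpa [pvOtherP] using (And.left (by simpa [pvOtherP, Bool.and_eq_true] using hy))
  have hy2 : (pvStatusOf y == "open") = false := by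
    simpa [pvOtherP] using (And.right (by simpa [pvOtherP, Bool.and_eq_true] using hy))
  simp [pvLexBefore, pvKeyA, hx', hy1, hy2]

theorem pv_lex_other_open {x y} (hx : pvOtherP x = true) (hy : pvOpenP y = true) :
    pvLexBefore x y = false := by
  have hx1 : (pvStatusOf x == "on_hold") = false := by
    simpa [pvOtherP] using (And.left (by simpa [pvOtherP, Bool.and_eq_true] using hx))
  have hx2 : (pvStatusOf x == "open") = false := by
    simpa [pvOtherP] using (And.right (by simpa [pvOtherP, Bool.and_eq_true] using hx))
  have hy' : pvStatusOf y = "open" := by simpa [pvOpenP] using hy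
  simp [pvLexBefore, pvKeyA, hx1, hx2, hy']

theorem pv_lex_other_other {x y} (hx : pvOtherP x = true) (hy : pvOtherP y = true) :
    pvLexBefore x y = decide (pvIdOf x < pvIdOf y) := by
  have hx1 : (pvStatusOf x == "on_hold") = false := by
    simpa [pvOtherP] using (And.left (by simpa [pvOtherP, Bool.and_eq_true] using hx))
  have hx2 : (pvStatusOf x == "open") = false := by
    simpa [pvOtherP] using (And.right (by simpa [pvOtherP, Bool.and_eq_true] using hx))
  have hy1 : (pvStatusOf y == "on_hold") = false := by
    simpa [pvOtherP] using (And.left (by simpa [pvOtherP, Bool.and_eq_true] using hy))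
  have hy2 : (pvStatusOf y == "open") = false := by
    simpa [pvOtherP] using (And.right (by simpa [pvOtherP, Bool.and_eq_true] using hy))
  simp [pvLexBefore, pvKeyA, hx1, hx2, hy1, hy2]

-- status trichotomy
theorem pv_status_cases (x : List (String × String)) :
    pvOnHoldP x = true ∨ pvOpenP x = true ∨ pvOtherP x = true := by
  by_cases h1 : pvStatusOf x = "on_hold"
  · exact Or.inl (by simp [pvOnHoldP, h1])
  · by_cases h2 : pvStatusOf x = "open"
    · exact Or.inr (Or.inl (by simp [pvOpenP, h2]))
    · exact Or.inr (Or.inr (by simp [pvOtherP, h1, h2]))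

theorem pv_hold_not_open {x} (h : pvOnHoldP x = true) : pvOpenP x = false := by
  have h' : pvStatusOf x = "on_hold" := by simpa [pvOnHoldP] using h
  simp [pvOpenP, h']

theorem pv_hold_not_other {x} (h : pvOnHoldP x = true) : pvOtherP x = false := by
  have h' : pvStatusOf x = "on_hold" := by simpa [pvOnHoldP] using h
  simp [pvOtherP, h']

theorem pv_open_not_hold {x} (h : pvOpenP x = true) : pvOnHoldP x = false := by
  have h' : pvStatusOf x = "open" := by simpa [pvOpenP] using h
  simp [pvOnHoldP, h']

theorem pv_open_not_other {x} (h : pvOpenP x = true) : pvOtherP x = false := by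
  have h' : pvStatusOf x = "open" := by simpa [pvOpenP] using h
  simp [pvOtherP, h']

theorem pv_other_not_hold {x} (h : pvOtherP x = true) : pvOnHoldP x = false := by
  simp only [pvOtherP, Bool.and_eq_true, Bool.not_eq_true'] at h
  simpa [pvOnHoldP] using h.1

theorem pv_other_not_open {x} (h : pvOtherP x = true) : pvOpenP x = false := by
  simp only [pvOtherP, Bool.and_eq_true, Bool.not_eq_true'] at h
  simpa [pvOpenP] using h.2

-- the loop invariant: inserting into a bucketed accumulator keeps the buckets separate
theorem pv_fold_buckets (opts : List (List (String × String)))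
    (h o r : List (List (String × String)))
    (Hh : ∀ y ∈ h, pvOnHoldP y = true) (Ho : ∀ y ∈ o, pvOpenP y = true)
    (Hr : ∀ y ∈ r, pvOtherP y = true) :
    opts.foldl (fun acc item => PySem.List.insertBy pvLexBefore item acc) (h ++ (o ++ r))
    = (opts.filter pvOnHoldP).foldl
        (fun acc x => PySem.List.insertBy (fun a b => decide (pvIdOf a < pvIdOf b)) x acc) h
      ++ ((opts.filter pvOpenP).foldl
        (fun acc x => PySem.List.insertBy (fun a b => decide (pvIdOf a < pvIdOf b)) x acc) o
      ++ (opts.filter pvOtherP).foldl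
        (fun acc x => PySem.List.insertBy (fun a b => decide (pvIdOf a < pvIdOf b)) x acc) r) := by
  induction opts generalizing h o r with
  | nil => simp
  | cons x rest ih =>
    rcases pv_status_cases x with hx | hx | hx
    · -- x goes to the on_hold bucket
      have step : PySem.List.insertBy pvLexBefore x (h ++ (o ++ r))
          = PySem.List.insertBy (fun a b => decide (pvIdOf a < pvIdOf b)) x h ++ (o ++ r) := by
        apply pv_insertBy_front
        · intro y hy; exact pv_lex_hold_hold hx (Hh y hy)
        · intro y hy
          rcases List.mem_append.mp hy with hy' | hy'
          · exact pv_lex_hold_not hx (pv_open_not_hold (Ho y hy'))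
          · exact pv_lex_hold_not hx (pv_other_not_hold (Hr y hy'))
      simp only [List.foldl_cons, List.filter_cons, hx, pv_hold_not_open hx,
        pv_hold_not_other hx, Bool.false_eq_true, if_true, if_false, step]
      exact ih _ o r
        (fun y hy => by
          rcases (PySem.List.mem_insertBy (fun a b => decide (pvIdOf a < pvIdOf b)) x y h).mp hy
            with rfl | hy'
          · exact hx
          · exact Hh y hy') Ho Hr
    · -- x goes to the open bucket
      have step : PySem.List.insertBy pvLexBefore x (h ++ (o ++ r))
          = h ++ (PySem.List.insertBy (fun a b => decide (pvIdOf a < pvIdOf b)) x o ++ r) := by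
        rw [pv_insertBy_skip _ _ h (o ++ r)
          (fun y hy => pv_lex_not_hold (pv_open_not_hold hx) (Hh y hy))]
        rw [pv_insertBy_front pvLexBefore (fun a b => decide (pvIdOf a < pvIdOf b)) x o r
          (fun y hy => pv_lex_open_open hx (Ho y hy))
          (fun y hy => pv_lex_open_other hx (Hr y hy))]
      simp only [List.foldl_cons, List.filter_cons, hx, pv_open_not_hold hx,
        pv_open_not_other hx, Bool.false_eq_true, if_true, if_false, step]
      exact ih h _ r Hh
        (fun y hy => by
          rcases (PySem.List.mem_insertBy (fun a b => decide (pvIdOf a < pvIdOf b)) x y o).mp hy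
            with rfl | hy'
          · exact hx
          · exact Ho y hy') Hr
    · -- x goes to the catch-all bucket
      have step : PySem.List.insertBy pvLexBefore x (h ++ (o ++ r))
          = h ++ (o ++ PySem.List.insertBy (fun a b => decide (pvIdOf a < pvIdOf b)) x r) := by
        rw [pv_insertBy_skip _ _ h (o ++ r)
          (fun y hy => pv_lex_not_hold (pv_other_not_hold hx) (Hh y hy))]
        rw [pv_insertBy_skip _ _ o r
          (fun y hy => pv_lex_other_open hx (Ho y hy))]
        have := pv_insertBy_front pvLexBefore (fun a b => decide (pvIdOf a < pvIdOf b)) x r []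
          (fun y hy => pv_lex_other_other hx (Hr y hy)) (fun y hy => absurd hy (List.not_mem_nil))
        simpa using this
      simp only [List.foldl_cons, List.filter_cons, hx, pv_other_not_hold hx,
        pv_other_not_open hx, Bool.false_eq_true, if_true, if_false, step]
      exact ih h o _ Hh Ho
        (fun y hy => by
          rcases (PySem.List.mem_insertBy (fun a b => decide (pvIdOf a < pvIdOf b)) x y r).mp hy
            with rfl | hy'
          · exact hx
          · exact Hr y hy')

-- ===== VERDICT (by name: the statement is the Claim_ definition above) =====
theorem build_bug_options_py_spec : Claim_equal_build_bug_options_py := by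
  intro bug_records _
  show build_bug_options_py bug_records = build_bug_options_py_alt bug_records
  unfold build_bug_options_py build_bug_options_py_alt
  cases bug_records with
  | none =>
    simp [PySem.List.sorted_eq_foldl_insertBy]
  | some records =>
    simp only []
    rw [pv_build_eq records []]
    rw [PySem.List.sorted_eq_foldl_insertBy, PySem.List.sorted_eq_foldl_insertBy,
      PySem.List.sorted_eq_foldl_insertBy]
    have := pv_fold_buckets ([] ++ records.filterMap pvMakeOption) [] [] []
      (by simp) (by simp) (by simp)
    simpa using this
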